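-- pv_equiv track=rewrite | github.com/Holodome/csbench | scripts/amalgamated.py | make_core_contents
-- ===== SOURCE A (Python) =====
-- import itertools
--
-- def make_core_contents(lines):
--     lines = list(itertools.dropwhile(lambda it: it.startswith("//"), lines))
--     lines = list(filter(lambda it: "#include \"csbench.h\"" not in it, lines))
--     lines = list(filter(lambda it: "#ifndef CSBENCH_H" not in it, lines))
--     lines = list(filter(lambda it: "#define CSBENCH_H" not in it, lines))
--     lines = list(filter(lambda it: "#endif // CSBENCH_H" not in it, lines))
--     while lines[0].isspace():
--         lines = lines[1:]
--     while lines[-1].isspace():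
--         lines = lines[:-1]
--     return lines
-- ===== SOURCE B (Python) =====
-- GUARDS = (
--     "#include \"csbench.h\"",
--     "#ifndef CSBENCH_H",
--     "#define CSBENCH_H",
--     "#endif // CSBENCH_H",
-- )
--
--
-- def make_core_contents(lines):
--     kept = []
--     in_header = True
--     for line in lines:
--         if in_header:
--             if line.startswith("//"):
--                 continue
--             in_header = False
--         if not any(g in line for g in GUARDS):
--             kept.append(line)
--     start = 0
--     for line in kept:
--         if not line.isspace():
--             break
--         start += 1
--     end = len(kept)
--     while end > start and kept[end - 1].isspace():
--         end -= 1
--     return kept[start:end]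
-- ===== Notes on version B (the rewrite author's own statement) =====
-- stated objective: alternative
-- what changed: Replaces A's five sequential passes (dropwhile + four filters) by one loop with an in_header flag and a combined guard test, and replaces A's repeated list-slicing trim loops by two index pointers plus a single slice.
-- outside the precondition, e.g. on make_core_contents([]): A raises IndexError, B returns []; on make_core_contents([' ']): A raises IndexError, B returns []
-- crash fix: On inputs where, after dropping the leading '//' header and removing guard lines, no non-whitespace line remains, A raises IndexError in its trim loops; B returns []. — e.g. on make_core_contents([" "]): A raises IndexError, B returns []
import Mathlib
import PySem

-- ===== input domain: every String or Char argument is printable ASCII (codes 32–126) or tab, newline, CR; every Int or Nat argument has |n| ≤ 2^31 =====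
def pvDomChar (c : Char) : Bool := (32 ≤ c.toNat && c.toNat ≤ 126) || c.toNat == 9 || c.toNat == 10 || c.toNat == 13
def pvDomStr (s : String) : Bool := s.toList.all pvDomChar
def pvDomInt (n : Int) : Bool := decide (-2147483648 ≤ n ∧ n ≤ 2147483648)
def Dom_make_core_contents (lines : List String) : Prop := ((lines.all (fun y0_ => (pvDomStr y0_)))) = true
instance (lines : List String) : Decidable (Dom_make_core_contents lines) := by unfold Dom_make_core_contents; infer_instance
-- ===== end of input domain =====

-- B replaces A's five sequential passes by one flagged loop plus a pointer-based trim; equivalence is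
-- claimed on inputs where A returns (Pre_); where A raises IndexError, B returns [] (Raises_ block).

-- ===== PORT A =====
-- while lines[0].isspace(): lines = lines[1:]   ([] = where Python raises IndexError; outside Pre_)
def pvTrimFrontA : List String → List String
  | [] => []
  | x :: rest => if PySem.Str.strIsspace x then pvTrimFrontA rest else x :: rest

-- while lines[-1].isspace(): lines = lines[:-1]   (lines[-1] = getLast?, none = where Python raises
-- IndexError, outside Pre_; lines[:-1] = dropLast, exact by PySem.List.slice_to_neg_one)
def pvTrimBackA (l : List String) : List String :=
  match h : l.getLast? with
  | none => []
  | some x =>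
    if PySem.Str.strIsspace x then pvTrimBackA l.dropLast else l
termination_by l.length
decreasing_by
  have hne : l ≠ [] := by intro hl; subst hl; simp at h
  have := List.length_pos_of_ne_nil hne
  simp [List.length_dropLast]; omega

def make_core_contents (lines : List String) : List String :=
  let l1 := lines.dropWhile (fun it => PySem.Str.startswith it "//")
  let l2 := l1.filter (fun it => !PySem.Str.isIn "#include \"csbench.h\"" it)
  let l3 := l2.filter (fun it => !PySem.Str.isIn "#ifndef CSBENCH_H" it)
  let l4 := l3.filter (fun it => !PySem.Str.isIn "#define CSBENCH_H" it)
  let l5 := l4.filter (fun it => !PySem.Str.isIn "#endif // CSBENCH_H" it)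
  pvTrimBackA (pvTrimFrontA l5)

-- ===== PORT B =====
def pvNoGuard (line : String) : Bool :=
  !(PySem.Str.isIn "#include \"csbench.h\"" line || PySem.Str.isIn "#ifndef CSBENCH_H" line ||
    PySem.Str.isIn "#define CSBENCH_H" line || PySem.Str.isIn "#endif // CSBENCH_H" line)

def pvFilterLoop : List String → Bool → List String → List String
  | [], _, kept => kept
  | line :: rest, inHeader, kept =>
    if inHeader && PySem.Str.startswith line "//" then pvFilterLoop rest inHeader kept
    else if pvNoGuard line then pvFilterLoop rest false (kept ++ [line])
    else pvFilterLoop rest false kept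

-- for line in kept: if not line.isspace(): break; start += 1
def pvFindStart : List String → Nat → Nat
  | [], start => start
  | line :: rest, start =>
    if !PySem.Str.strIsspace line then start else pvFindStart rest (start + 1)

-- while end > start and kept[end - 1].isspace(): end -= 1   (kept[end-1] is in range by the guard,
-- so getD is exact; structural on end)
def pvFindEnd (kept : List String) (start : Nat) : Nat → Nat
  | 0 => 0
  | e + 1 =>
    if start < e + 1 then
      if PySem.Str.strIsspace (kept.getD e "") then pvFindEnd kept start e else e + 1
    else e + 1

def make_core_contents_alt (lines : List String) : List String :=
  let kept := pvFilterLoop lines true []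
  let start := pvFindStart kept 0
  let stop := pvFindEnd kept start kept.length
  PySem.List.slice kept (some (start : Int)) (some (stop : Int))

-- ===== PRECONDITION & SPEC =====
-- Pre_ excludes exactly the inputs on which A raises IndexError: those where, after dropping the
-- leading '//' lines and removing the four guard lines, no non-whitespace line remains.
def Pre_make_core_contents (lines : List String) : Prop :=
  (((lines.dropWhile (fun it => PySem.Str.startswith it "//")).filter
      (fun it => !(PySem.Str.isIn "#include \"csbench.h\"" it || PySem.Str.isIn "#ifndef CSBENCH_H" it ||
        PySem.Str.isIn "#define CSBENCH_H" it || PySem.Str.isIn "#endif // CSBENCH_H" it))).any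
      (fun it => !PySem.Str.strIsspace it)) = true
instance (lines : List String) : Decidable (Pre_make_core_contents lines) := by
  unfold Pre_make_core_contents; infer_instance

def pvWitness_make_core_contents : List String := ["a"]

-- On inputs where, after the header drop and guard filtering, no non-whitespace line remains, A
-- raises IndexError in its trim loops; B returns [].
def Raises_make_core_contents (lines : List String) : Prop :=
  (((lines.dropWhile (fun it => PySem.Str.startswith it "//")).filter
      (fun it => !(PySem.Str.isIn "#include \"csbench.h\"" it || PySem.Str.isIn "#ifndef CSBENCH_H" it ||
        PySem.Str.isIn "#define CSBENCH_H" it || PySem.Str.isIn "#endif // CSBENCH_H" it))).any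
      (fun it => !PySem.Str.strIsspace it)) = false
instance (lines : List String) : Decidable (Raises_make_core_contents lines) := by
  unfold Raises_make_core_contents; infer_instance

def pvRaiseWitness_make_core_contents : List String := [" "]
def pvRaiseWitnessOut_make_core_contents : List String := []

def Spec_make_core_contents (lines : List String) (out : List String) : Prop :=
  out = make_core_contents_alt lines
instance (lines : List String) (out : List String) : Decidable (Spec_make_core_contents lines out) := by
  unfold Spec_make_core_contents; infer_instance

-- ===== CLAIM (what is proved, stated in full; the proofs are below) =====
def Claim_equal_make_core_contents : Prop := ∀ (lines : List String), Dom_make_core_contents lines → Pre_make_core_contents lines → Spec_make_core_contents lines (make_core_contents lines)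

def Claim_raises_make_core_contents : Prop := (∀ (lines : List String), Dom_make_core_contents lines → Raises_make_core_contents lines → ¬ Pre_make_core_contents lines) ∧ (Dom_make_core_contents (pvRaiseWitness_make_core_contents) ∧ Raises_make_core_contents (pvRaiseWitness_make_core_contents) ∧ make_core_contents_alt (pvRaiseWitness_make_core_contents) = pvRaiseWitnessOut_make_core_contents)

-- ===== LEMMAS AND PROOFS =====

lemma pvFilterLoop_false (rest : List String) (kept : List String) :
    pvFilterLoop rest false kept = kept ++ rest.filter pvNoGuard := by
  induction rest generalizing kept with
  | nil => simp [pvFilterLoop]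
  | cons x t ih =>
    by_cases hx : pvNoGuard x = true <;>
      simp [pvFilterLoop, hx, ih]

lemma pvFilterLoop_true (lines : List String) (kept : List String) :
    pvFilterLoop lines true kept =
      kept ++ (lines.dropWhile (fun it => PySem.Str.startswith it "//")).filter pvNoGuard := by
  induction lines generalizing kept with
  | nil => simp [pvFilterLoop]
  | cons x t ih =>
    by_cases hsw : PySem.Chars.startswith x.toList ['/', '/'] = true
    · simp [pvFilterLoop, hsw, ih]
    · by_cases hx : pvNoGuard x = true <;>
        simp [pvFilterLoop, hsw, hx, pvFilterLoop_false]

lemma pvFilter4 {a : Type} (p1 p2 p3 p4 : a → Bool) (m : List a) :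
    (((m.filter p1).filter p2).filter p3).filter p4
      = m.filter (fun x => p1 x && p2 x && p3 x && p4 x) := by
  induction m with
  | nil => rfl
  | cons x t ih =>
    cases h1 : p1 x <;> cases h2 : p2 x <;> cases h3 : p3 x <;> cases h4 : p4 x <;>
      simp [h1, h2, h3, h4, ih, -List.filter_filter]

lemma pvFilters_eq (m : List String) :
    (((m.filter (fun it => !PySem.Str.isIn "#include \"csbench.h\"" it)).filter
        (fun it => !PySem.Str.isIn "#ifndef CSBENCH_H" it)).filter
        (fun it => !PySem.Str.isIn "#define CSBENCH_H" it)).filter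
        (fun it => !PySem.Str.isIn "#endif // CSBENCH_H" it) = m.filter pvNoGuard := by
  rw [pvFilter4]
  apply List.filter_congr
  intro x _
  simp only [pvNoGuard, Bool.not_or]

lemma pvFindStart_eq (m : List String) (i : Nat) :
    pvFindStart m i = i + (m.takeWhile (fun it => PySem.Str.strIsspace it)).length := by
  induction m generalizing i with
  | nil => simp [pvFindStart]
  | cons x t ih =>
    by_cases hx : PySem.Str.strIsspace x = true
    · have hx' : PySem.Chars.strIsspace x.toList = true := hx
      simp [pvFindStart, hx', ih]
      omega
    · have hx' : PySem.Chars.strIsspace x.toList = false := eq_false_of_ne_true hx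
      simp [pvFindStart, hx']

lemma pvFront_spec (m : List String) :
    (∃ x ∈ m, PySem.Str.strIsspace x = false) →
    pvTrimFrontA m = m.drop ((m.takeWhile (fun it => PySem.Str.strIsspace it)).length) ∧
      (m.takeWhile (fun it => PySem.Str.strIsspace it)).length < m.length ∧
      PySem.Str.strIsspace
        (m.getD ((m.takeWhile (fun it => PySem.Str.strIsspace it)).length) "") = false := by
  induction m with
  | nil => intro h; simp at h
  | cons x t ih =>
    intro h
    by_cases hx : PySem.Str.strIsspace x = true
    · have ht : ∃ y ∈ t, PySem.Str.strIsspace y = false := by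
        obtain ⟨y, hy, hys⟩ := h
        rcases List.mem_cons.mp hy with rfl | hyt
        · rw [hys] at hx; cases hx
        · exact ⟨y, hyt, hys⟩
      obtain ⟨ih1, ih2, ih3⟩ := ih ht
      have htw : (x :: t).takeWhile (fun it => PySem.Str.strIsspace it)
          = x :: t.takeWhile (fun it => PySem.Str.strIsspace it) := by
        rw [List.takeWhile_cons, if_pos hx]
      have htf : pvTrimFrontA (x :: t) = pvTrimFrontA t := by
        simp only [pvTrimFrontA]; rw [if_pos hx]
      refine ⟨?_, ?_, ?_⟩
      · rw [htf, htw, ih1, List.length_cons, List.drop_succ_cons]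
      · rw [htw, List.length_cons, List.length_cons]; omega
      · rw [htw, List.length_cons, List.getD_cons_succ]; exact ih3
    · have hx' : PySem.Str.strIsspace x = false := eq_false_of_ne_true hx
      have htw : (x :: t).takeWhile (fun it => PySem.Str.strIsspace it) = [] := by
        rw [List.takeWhile_cons, if_neg hx]
      have htf : pvTrimFrontA (x :: t) = x :: t := by
        simp only [pvTrimFrontA]; rw [if_neg hx]
      refine ⟨?_, ?_, ?_⟩
      · rw [htf, htw, List.length_nil, List.drop_zero]
      · rw [htw]; simp
      · rw [htw, List.length_nil, List.getD_cons_zero]; exact hx'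

lemma pvTrimBackA_concat (l : List String) (x : String) :
    pvTrimBackA (l ++ [x]) = if PySem.Str.strIsspace x then pvTrimBackA l else l ++ [x] := by
  rw [pvTrimBackA]
  split
  · next h => simp at h
  · next y h =>
    rw [List.getLast?_concat, Option.some_inj] at h
    subst h
    rw [List.dropLast_concat]

lemma pvBack_spec (m : List String) (s : Nat) :
    ∀ e, e ≤ m.length → (∃ j, s ≤ j ∧ j < e ∧ PySem.Str.strIsspace (m.getD j "") = false) →
      pvTrimBackA ((m.take e).drop s) = (m.take (pvFindEnd m s e)).drop s := by
  intro e
  induction e with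
  | zero => intro _ h; obtain ⟨j, _, hj, _⟩ := h; omega
  | succ e ih =>
    intro he h
    obtain ⟨j, hsj, hje, hjs⟩ := h
    have hel : e < m.length := by omega
    have hse : s < e + 1 := by omega
    have htake : m.take (e + 1) = m.take e ++ [m[e]] := List.take_succ_eq_append_getElem hel
    have hlen : (m.take e).length = e := by rw [List.length_take]; omega
    have hdrop : (m.take (e + 1)).drop s = (m.take e).drop s ++ [m[e]] := by
      rw [htake, List.drop_append_of_le_length (by omega)]
    have hge : m.getD e "" = m[e] := List.getD_eq_getElem m "" hel
    by_cases hsp : PySem.Str.strIsspace (m.getD e "") = true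
    · have hj' : j < e := by
        rcases Nat.lt_or_ge j e with h' | h'
        · exact h'
        · have : j = e := by omega
          subst this; rw [hjs] at hsp; cases hsp
      have hspx : PySem.Str.strIsspace m[e] = true := hge ▸ hsp
      rw [hdrop, pvTrimBackA_concat, if_pos hspx, ih (by omega) ⟨j, hsj, hj', hjs⟩]
      have hfe : pvFindEnd m s (e + 1) = pvFindEnd m s e := by
        simp only [pvFindEnd]
        rw [if_pos hse, if_pos hsp]
      rw [hfe]
    · have hsp' : PySem.Str.strIsspace (m.getD e "") = false := eq_false_of_ne_true hsp
      have hspx : PySem.Str.strIsspace m[e] = false := hge ▸ hsp'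
      rw [hdrop, pvTrimBackA_concat, if_neg (by rw [hspx]; simp), ← hdrop]
      have hfe : pvFindEnd m s (e + 1) = e + 1 := by
        simp only [pvFindEnd]
        rw [if_pos hse, if_neg (by rw [hsp']; simp)]
      rw [hfe]

-- ===== VERDICT (by name: the statement is the Claim_ definition above) =====
theorem make_core_contents_spec : Claim_equal_make_core_contents := by
  intro lines _ hpre
  unfold Spec_make_core_contents
  set m := (lines.dropWhile (fun it => PySem.Str.startswith it "//")).filter pvNoGuard with hm
  have hpre' : ∃ x ∈ m, PySem.Str.strIsspace x = false := by
    unfold Pre_make_core_contents at hpre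
    rw [List.any_eq_true] at hpre
    obtain ⟨x, hx, hxs⟩ := hpre
    exact ⟨x, hx, by simpa using hxs⟩
  obtain ⟨hfront, hs_lt, hs_ok⟩ := pvFront_spec m hpre'
  set s := (m.takeWhile (fun it => PySem.Str.strIsspace it)).length with hs
  have hA : make_core_contents lines = pvTrimBackA (pvTrimFrontA m) := by
    simp only [make_core_contents, pvFilters_eq, hm]
  have hB : make_core_contents_alt lines =
      PySem.List.slice m (some (s : Int)) (some ((pvFindEnd m s m.length : Nat) : Int)) := by
    simp only [make_core_contents_alt, pvFilterLoop_true, List.nil_append, ← hm,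
      pvFindStart_eq, Nat.zero_add, ← hs]
  rw [hA, hB, hfront]
  have hback := pvBack_spec m s m.length (le_refl _) ⟨s, le_refl _, hs_lt, hs_ok⟩
  rw [List.take_length] at hback
  rw [hback, PySem.List.slice_natCast, List.drop_take]

def make_core_contents_raises : Claim_raises_make_core_contents := by
  unfold Claim_raises_make_core_contents
  constructor
  · intro lines _ hr hp
    unfold Raises_make_core_contents at hr
    unfold Pre_make_core_contents at hp
    rw [hp] at hr
    cases hr
  · exact ⟨by decide, by decide, by decide⟩
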